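-- pv_equiv track=rewrite | github.com/austonnn/ucsd_bio_2 | bio 2 week 4/1.3.7_1.py | SpectralConvolution
-- ===== SOURCE A (Python) =====
-- def SpectralConvolution(Spectrum):
--     ans_list = []
--     tmp_list = [0]
--     #Spectrum = sorted(Spectrum)
--     tmp_list.extend(Spectrum)
--     tmp_list = sorted(tmp_list)
--     for i in tmp_list:
--         for j in tmp_list:
--             if 56 <(i - j)<201:
--                 ans_list.append(i - j)
--
--     return ans_list
-- ===== SOURCE B (Python) =====
-- def _bisect(a, x, right):
--     # first index k with a[k] > x (right=True) / a[k] >= x (right=False), a sorted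
--     lo, hi = 0, len(a)
--     while lo < hi:
--         mid = (lo + hi) // 2
--         if (a[mid] <= x) if right else (a[mid] < x):
--             lo = mid + 1
--         else:
--             hi = mid
--     return lo
--
--
-- def SpectralConvolution(Spectrum):
--     t = sorted([0] + Spectrum)
--     ans = []
--     for i in t:
--         lo = _bisect(t, i - 200, False)   # first j with t[j] >= i - 200, i.e. i - t[j] < 201
--         hi = _bisect(t, i - 57, True)     # first j with t[j] > i - 57, i.e. i - t[j] <= 56
--         for k in range(lo, hi):
--             ans.append(i - t[k])
--     return ans
-- ===== Notes on version B (the rewrite author's own statement) =====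
-- stated objective: faster
-- what changed: B sorts once and then, for each element i, hand-written binary searches locate the contiguous window of partners j with i-200 <= j <= i-57 in the sorted list, replacing A's full inner scan; A's nested loops are O(n^2) while B is O(n log n + output size).
import Mathlib
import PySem

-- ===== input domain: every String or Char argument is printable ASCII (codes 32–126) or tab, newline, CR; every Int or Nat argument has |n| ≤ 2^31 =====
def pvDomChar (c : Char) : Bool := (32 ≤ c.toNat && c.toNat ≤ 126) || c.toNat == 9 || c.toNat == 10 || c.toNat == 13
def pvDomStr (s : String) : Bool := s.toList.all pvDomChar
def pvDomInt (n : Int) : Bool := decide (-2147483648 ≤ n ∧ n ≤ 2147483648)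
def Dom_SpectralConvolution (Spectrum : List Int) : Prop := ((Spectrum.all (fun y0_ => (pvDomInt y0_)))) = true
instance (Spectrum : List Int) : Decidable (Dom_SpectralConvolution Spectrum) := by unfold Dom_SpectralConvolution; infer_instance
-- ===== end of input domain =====

-- B replaces A's inner O(n) scan of the sorted list by a hand-written binary search for the
-- window of partners in the (56,201) band: O(n log n + output) instead of O(n^2).

-- ===== PORT A =====
def SpectralConvolution (Spectrum : List Int) : List Int :=
  -- ans_list = []; tmp_list = [0]; tmp_list.extend(Spectrum); tmp_list = sorted(tmp_list)
  let tmp_list := PySem.List.sorted ([0] ++ Spectrum) (fun j => j)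
  -- for i in tmp_list: for j in tmp_list: if 56 < (i - j) < 201: ans_list.append(i - j)
  tmp_list.foldl (fun ans_list i =>
    tmp_list.foldl (fun ans_list j =>
      if 56 < i - j ∧ i - j < 201 then ans_list ++ [i - j] else ans_list) ans_list) []

-- ===== PORT B =====
-- _bisect(a, x, right): while lo < hi: mid = (lo+hi)//2; a[mid] is in range (mid < hi ≤ len a),
-- so List.getD is exact there.  The while loop is ported with a fuel counter (hi - lo shrinks
-- strictly each iteration, so fuel hi - lo is always enough): a totality guard, not an algorithm change.
def pvBisectGo (a : List Int) (x : Int) (right : Bool) : Nat → Nat → Nat → Nat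
  | 0, lo, _ => lo
  | fuel + 1, lo, hi =>
    if lo < hi then
      if (if right then a.getD ((lo + hi) / 2) 0 ≤ x else a.getD ((lo + hi) / 2) 0 < x) then
        pvBisectGo a x right fuel ((lo + hi) / 2 + 1) hi
      else
        pvBisectGo a x right fuel lo ((lo + hi) / 2)
    else lo

def pvBisect (a : List Int) (x : Int) (right : Bool) (lo hi : Nat) : Nat :=
  pvBisectGo a x right (hi - lo) lo hi

def SpectralConvolution_alt (Spectrum : List Int) : List Int :=
  let t := PySem.List.sorted ([0] ++ Spectrum) (fun j => j)
  -- for i in t: lo = _bisect(t, i-200, False); hi = _bisect(t, i-57, True);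
  --             for k in range(lo, hi): ans.append(i - t[k])
  -- range(lo, hi) over the nonnegative indices lo, hi is List.range' lo (hi - lo) (exact:
  -- empty when hi ≤ lo, else lo, lo+1, …, hi-1); t[k] with 0 ≤ k < len t is List.getD (exact).
  t.foldl (fun ans i =>
    let lo := pvBisect t (i - 200) false 0 t.length
    let hi := pvBisect t (i - 57) true 0 t.length
    (List.range' lo (hi - lo)).foldl (fun ans k => ans ++ [i - t.getD k 0]) ans) []

-- ===== PRECONDITION & SPEC =====
def Spec_SpectralConvolution (Spectrum : List Int) (out : List Int) : Prop := out = SpectralConvolution_alt Spectrum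
instance (Spectrum : List Int) (out : List Int) : Decidable (Spec_SpectralConvolution Spectrum out) := by unfold Spec_SpectralConvolution; infer_instance

-- ===== CLAIM (what is proved, stated in full; the proofs are below) =====
def Claim_equal_SpectralConvolution : Prop := ∀ (Spectrum : List Int), Dom_SpectralConvolution Spectrum → Spec_SpectralConvolution Spectrum (SpectralConvolution Spectrum)

-- ===== LEMMAS AND PROOFS =====

-- The binary search returns a split point: everything strictly below it satisfies the probe
-- (t[k] < x for bisect-left, t[k] ≤ x for bisect-right), everything at or above it fails it.
theorem pvBisectGo_spec (t : List Int) (x : Int) (right : Bool)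
    (hmono : ∀ p q (hp : p < t.length) (hq : q < t.length), p ≤ q → t[p] ≤ t[q]) :
    ∀ fuel lo hi, hi - lo ≤ fuel → lo ≤ hi → hi ≤ t.length →
    (∀ k (hk : k < t.length), k < lo → (if right then t[k] ≤ x else t[k] < x)) →
    (∀ k (hk : k < t.length), hi ≤ k → ¬(if right then t[k] ≤ x else t[k] < x)) →
    pvBisectGo t x right fuel lo hi ≤ t.length ∧
    (∀ k (hk : k < t.length), k < pvBisectGo t x right fuel lo hi → (if right then t[k] ≤ x else t[k] < x)) ∧
    (∀ k (hk : k < t.length), pvBisectGo t x right fuel lo hi ≤ k → ¬(if right then t[k] ≤ x else t[k] < x)) := by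
  have hdc : ∀ u v : Int, u ≤ v → (if right then v ≤ x else v < x) → (if right then u ≤ x else u < x) := by
    intro u v huv h; cases right <;> simp only [if_true, if_false, Bool.false_eq_true] at h ⊢ <;> omega
  intro fuel
  induction fuel with
  | zero =>
    intro lo hi hfuel hle hhi hbelow habove
    refine ⟨by simpa [pvBisectGo] using by omega, ?_, ?_⟩
    · intro k hk hklt
      exact hbelow k hk (by simpa [pvBisectGo] using hklt)
    · intro k hk hge
      exact habove k hk (by simp only [pvBisectGo] at hge; omega)
  | succ fuel ih =>
    intro lo hi hfuel hle hhi hbelow habove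
    rw [pvBisectGo]
    by_cases h : lo < hi
    · rw [if_pos h]
      have hmidt : (lo + hi) / 2 < t.length := by omega
      rw [List.getD_eq_getElem t 0 hmidt]
      by_cases hp : (if right then t[(lo + hi) / 2] ≤ x else t[(lo + hi) / 2] < x)
      · rw [if_pos hp]
        refine ih ((lo + hi) / 2 + 1) hi (by omega) (by omega) hhi ?_ habove
        intro k hk hklt
        exact hdc _ _ (hmono k ((lo + hi) / 2) hk hmidt (by omega)) hp
      · rw [if_neg hp]
        refine ih lo ((lo + hi) / 2) (by omega) (by omega) (by omega) hbelow ?_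
        intro k hk hge hPk
        exact hp (hdc _ _ (hmono ((lo + hi) / 2) k hmidt hk hge) hPk)
    · rw [if_neg h]
      refine ⟨by omega, hbelow, ?_⟩
      intro k hk hge
      exact habove k hk (by omega)

theorem pvBisect_spec (t : List Int) (x : Int) (right : Bool)
    (hmono : ∀ p q (hp : p < t.length) (hq : q < t.length), p ≤ q → t[p] ≤ t[q])
    (lo hi : Nat) (hle : lo ≤ hi) (hhi : hi ≤ t.length)
    (hbelow : ∀ k (hk : k < t.length), k < lo → (if right then t[k] ≤ x else t[k] < x))
    (habove : ∀ k (hk : k < t.length), hi ≤ k → ¬(if right then t[k] ≤ x else t[k] < x)) :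
    pvBisect t x right lo hi ≤ t.length ∧
    (∀ k (hk : k < t.length), k < pvBisect t x right lo hi → (if right then t[k] ≤ x else t[k] < x)) ∧
    (∀ k (hk : k < t.length), pvBisect t x right lo hi ≤ k → ¬(if right then t[k] ≤ x else t[k] < x)) := by
  exact pvBisectGo_spec t x right hmono (hi - lo) lo hi (le_refl _) hle hhi hbelow habove

-- If lo/hi bracket exactly the indices whose values lie in [a, b] (a ≤ b), then reading the
-- index window off the list equals filtering the list by value.
theorem window_eq (t : List Int) (a b : Int) (hab : a ≤ b)
    (lo hi : Nat) (hlo : lo ≤ t.length) (hhi : hi ≤ t.length)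
    (h1 : ∀ k (hk : k < t.length), k < lo → t[k] < a)
    (h2 : ∀ k (hk : k < t.length), lo ≤ k → a ≤ t[k])
    (h3 : ∀ k (hk : k < t.length), k < hi → t[k] ≤ b)
    (h4 : ∀ k (hk : k < t.length), hi ≤ k → b < t[k]) :
    (List.range' lo (hi - lo)).map (fun k => t.getD k 0) =
      t.filter (fun j => decide (a ≤ j) && decide (j ≤ b)) := by
  have hlohi : lo ≤ hi := by
    by_contra hcon
    have hhl : hi < t.length := by omega
    have ha := h1 hi hhl (by omega)
    have hb := h4 hi hhl (le_refl _)
    omega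
  have hL : (List.range' lo (hi - lo)).map (fun k => t.getD k 0) = (t.drop lo).take (hi - lo) := by
    apply List.ext_getElem
    · simp; omega
    · intro m hm1 hm2
      have hmlt : m < hi - lo := by simpa using hm1
      have hmt : lo + m < t.length := by omega
      simp only [List.getElem_map, List.getElem_range', List.getElem_take, List.getElem_drop, one_mul]
      rw [List.getD_eq_getElem t 0 hmt]
  have hsplit : t = t.take lo ++ ((t.drop lo).take (hi - lo) ++ t.drop hi) := by
    conv_lhs => rw [← List.take_append_drop lo t]
    congr 1
    conv_lhs => rw [← List.take_append_drop (hi - lo) (t.drop lo)]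
    congr 1
    rw [List.drop_drop]
    congr 1
    omega
  rw [hL]
  conv_rhs => rw [hsplit]
  rw [List.filter_append, List.filter_append]
  have e1 : (t.take lo).filter (fun j => decide (a ≤ j) && decide (j ≤ b)) = [] := by
    rw [List.filter_eq_nil_iff]
    intro y hy
    obtain ⟨k, hk, hky⟩ := List.mem_iff_getElem.mp hy
    have hk' : k < lo := by simp at hk; omega
    have hkt : k < t.length := by omega
    rw [List.getElem_take] at hky
    have := h1 k hkt hk'
    simp only [Bool.and_eq_true, decide_eq_true_eq, not_and]
    intro hay
    omega
  have e2 : ((t.drop lo).take (hi - lo)).filter (fun j => decide (a ≤ j) && decide (j ≤ b))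
      = (t.drop lo).take (hi - lo) := by
    rw [List.filter_eq_self]
    intro y hy
    obtain ⟨m, hm, hmy⟩ := List.mem_iff_getElem.mp hy
    have hm' : m < hi - lo := by simp at hm; omega
    have hmt : lo + m < t.length := by omega
    rw [List.getElem_take, List.getElem_drop] at hmy
    have hge := h2 (lo + m) hmt (by omega)
    have hle2 := h3 (lo + m) hmt (by omega)
    simp only [Bool.and_eq_true, decide_eq_true_eq]
    omega
  have e3 : (t.drop hi).filter (fun j => decide (a ≤ j) && decide (j ≤ b)) = [] := by
    rw [List.filter_eq_nil_iff]
    intro y hy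
    obtain ⟨k, hk, hky⟩ := List.mem_iff_getElem.mp hy
    have hkt : hi + k < t.length := by simp at hk; omega
    rw [List.getElem_drop] at hky
    have := h4 (hi + k) hkt (by omega)
    simp only [Bool.and_eq_true, decide_eq_true_eq, not_and]
    intro hay
    omega
  rw [e1, e2, e3]
  simp

-- ===== VERDICT (by name: the statement is the Claim_ definition above) =====
theorem SpectralConvolution_spec : Claim_equal_SpectralConvolution := by
  intro Spectrum _
  show SpectralConvolution Spectrum = SpectralConvolution_alt Spectrum
  unfold SpectralConvolution SpectralConvolution_alt
  dsimp only []
  have hpair : (PySem.List.sorted ([0] ++ Spectrum) (fun j => j)).Pairwise (· ≤ ·) := by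
    simpa using PySem.List.sorted_pairwise ([0] ++ Spectrum) (fun j => j)
  set t := PySem.List.sorted ([0] ++ Spectrum) (fun j => j) with ht
  have hmono : ∀ p q (hp : p < t.length) (hq : q < t.length), p ≤ q → t[p] ≤ t[q] := by
    intro p q hp hq hpq
    rcases Nat.lt_or_ge p q with hlt | hge
    · exact List.pairwise_iff_getElem.mp hpair p q hp hq hlt
    · have : p = q := by omega
      subst this; exact le_refl _
  apply PySem.List.foldl_congr_mem
  intro ans i _
  -- A's inner scan is the banded filter, mapped through i - ·
  have hA : t.foldl (fun ans_list j => if 56 < i - j ∧ i - j < 201 then ans_list ++ [i - j] else ans_list) ans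
      = ans ++ (t.filter (fun j => decide (i - 200 ≤ j) && decide (j ≤ i - 57))).map (fun j => i - j) := by
    have hfun : (fun (ans_list : List Int) j => if 56 < i - j ∧ i - j < 201 then ans_list ++ [i - j] else ans_list)
        = (fun ans_list j => if (fun j => decide (i - 200 ≤ j) && decide (j ≤ i - 57)) j = true then ans_list ++ [(fun j => i - j) j] else ans_list) := by
      funext ansl j
      by_cases h : 56 < i - j ∧ i - j < 201
      · rw [if_pos h, if_pos (by simp only [Bool.and_eq_true, decide_eq_true_eq]; omega)]
      · rw [if_neg h, if_neg (by simp only [Bool.and_eq_true, decide_eq_true_eq]; omega)]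
    rw [hfun, PySem.List.foldl_append_if]
  -- B's binary searches bracket exactly that band
  obtain ⟨hlo_le, hlo_below, hlo_above⟩ :=
    pvBisect_spec t (i - 200) false hmono 0 t.length (Nat.zero_le _) (le_refl _)
      (by intro k hk hklt; omega) (by intro k hk hge hP; omega)
  obtain ⟨hhi_le, hhi_below, hhi_above⟩ :=
    pvBisect_spec t (i - 57) true hmono 0 t.length (Nat.zero_le _) (le_refl _)
      (by intro k hk hklt; omega) (by intro k hk hge hP; omega)
  simp only [if_false, Bool.false_eq_true, not_lt] at hlo_below hlo_above
  simp only [if_true, not_le] at hhi_below hhi_above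
  rw [hA, PySem.List.foldl_append_singleton_eq_map]
  congr 1
  symm
  have hwin := window_eq t (i - 200) (i - 57) (by omega)
    (pvBisect t (i - 200) false 0 t.length) (pvBisect t (i - 57) true 0 t.length)
    hlo_le hhi_le hlo_below hlo_above hhi_below hhi_above
  calc (List.range' (pvBisect t (i - 200) false 0 t.length)
          (pvBisect t (i - 57) true 0 t.length - pvBisect t (i - 200) false 0 t.length)).map
          (fun k => i - t.getD k 0)
      = ((List.range' (pvBisect t (i - 200) false 0 t.length)
          (pvBisect t (i - 57) true 0 t.length - pvBisect t (i - 200) false 0 t.length)).map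
          (fun k => t.getD k 0)).map (fun j => i - j) := by rw [List.map_map]; rfl
    _ = (t.filter (fun j => decide (i - 200 ≤ j) && decide (j ≤ i - 57))).map (fun j => i - j) := by rw [hwin]
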